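-- pv_equiv track=rewrite | github.com/ttm/prv | tokipona/makeVimSyntax.py | uniqueCombinations
-- ===== SOURCE A (Python) =====
-- def uniqueCombinations(comb_pos_):
--     comb_pos_ = comb_pos_[:]
--     for i in comb_pos_:
--         same_size = [j for j in comb_pos_ if (len(j) == len(i) and j != i)]
--         for comb in same_size:
--             if sum([pos in i for pos in comb]) == len(i):
--                 comb_pos_.remove(i)
--                 return uniqueCombinations(comb_pos_)
--     return comb_pos_
-- ===== SOURCE B (Python) =====
-- def uniqueCombinations(comb_pos_):
--     # Single forward pass: an element kept earlier can never become removable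
--     # later (removals only shrink the witness pool), so no restart is needed.
--     kept = []
--     rest = list(comb_pos_)
--     while rest:
--         i = rest.pop(0)
--         current = kept + [i] + rest
--         if any(len(j) == len(i) and j != i and all(p in i for p in j) for j in current):
--             continue
--         kept.append(i)
--     return kept
-- ===== Notes on version B (the rewrite author's own statement) =====
-- stated objective: faster
-- what changed: Replaces A's remove-first-hit-and-restart self-recursion with a single forward pass using a kept-prefix accumulator, valid because an element once found non-removable can never become removable after later removals.
import Mathlib
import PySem

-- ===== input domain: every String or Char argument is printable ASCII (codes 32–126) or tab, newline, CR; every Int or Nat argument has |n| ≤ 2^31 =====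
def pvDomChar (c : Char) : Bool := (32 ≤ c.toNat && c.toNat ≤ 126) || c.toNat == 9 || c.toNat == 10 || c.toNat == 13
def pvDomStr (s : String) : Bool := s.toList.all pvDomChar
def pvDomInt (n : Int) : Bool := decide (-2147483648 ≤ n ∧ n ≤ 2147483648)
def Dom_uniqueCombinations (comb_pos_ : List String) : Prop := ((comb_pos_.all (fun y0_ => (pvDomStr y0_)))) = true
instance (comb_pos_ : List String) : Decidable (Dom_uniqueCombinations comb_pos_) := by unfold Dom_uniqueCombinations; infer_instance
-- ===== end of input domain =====

-- B replaces A's remove-and-restart recursion by a single forward pass (kept-prefix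
-- accumulator); objective: faster (no restart from the front after each removal).

-- ===== PORT A =====
-- A's inner test for one candidate `comb` against `i`:
-- sum([pos in i for pos in comb]) == len(i); `pos in i` is Python substring
-- membership, exact as char membership since `pos` is a single character.
def pvSumCondA (i comb : String) : Bool :=
  ((comb.toList.map (fun pos => if i.toList.contains pos then (1 : Nat) else 0)).sum)
    == i.toList.length

-- A's outer double loop body for a fixed current list L and element i:
-- same_size = [j for j in L if len(j)==len(i) and j != i]; any comb in it passing the test.
def pvHitA (L : List String) (i : String) : Bool :=
  (L.filter (fun j => j.toList.length == i.toList.length && j != i)).any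
    (fun comb => pvSumCondA i comb)

-- A: scan for the first i that hits, remove it (comb_pos_.remove(i): first occurrence
-- by value; exact as List.erase, and i ∈ L is guaranteed by find?) and recurse.
def uniqueCombinations (comb_pos_ : List String) : List String :=
  match hL : comb_pos_.find? (fun i => pvHitA comb_pos_ i) with
  | some i => uniqueCombinations (comb_pos_.erase i)
  | none => comb_pos_
termination_by comb_pos_.length
decreasing_by
  have hmem : i ∈ comb_pos_ := List.mem_of_find?_eq_some hL
  have := List.length_erase_of_mem hmem
  have : 0 < comb_pos_.length := List.length_pos_of_mem hmem
  omega

-- ===== PORT B =====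
-- B's test: some j in the current list, same length, different value, all chars in i.
def pvHitB (L : List String) (i : String) : Bool :=
  L.any (fun j => j.toList.length == i.toList.length && j != i
                  && j.toList.all (fun p => i.toList.contains p))

-- B's while loop: kept = acc (in order), rest still to be examined.
def pvGoB (acc rest : List String) : List String :=
  match rest with
  | [] => acc
  | i :: rs =>
    if pvHitB (acc ++ i :: rs) i then pvGoB acc rs
    else pvGoB (acc ++ [i]) rs

def uniqueCombinations_alt (comb_pos_ : List String) : List String :=
  pvGoB [] comb_pos_

-- ===== PRECONDITION & SPEC =====
def Spec_uniqueCombinations (comb_pos_ : List String) (out : List String) : Prop := out = uniqueCombinations_alt comb_pos_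
instance (comb_pos_ : List String) (out : List String) : Decidable (Spec_uniqueCombinations comb_pos_ out) := by unfold Spec_uniqueCombinations; infer_instance

-- ===== CLAIM (what is proved, stated in full; the proofs are below) =====
def Claim_equal_uniqueCombinations : Prop := ∀ (comb_pos_ : List String), Dom_uniqueCombinations comb_pos_ → Spec_uniqueCombinations comb_pos_ (uniqueCombinations comb_pos_)

-- ===== LEMMAS AND PROOFS =====

-- indicator sums are bounded by the length
lemma indicator_sum_le (p : Char → Bool) (l : List Char) :
    (l.map (fun c => if p c then (1 : Nat) else 0)).sum ≤ l.length := by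
  induction l with
  | nil => simp
  | cons c cs ih =>
    simp only [List.map_cons, List.sum_cons, List.length_cons]
    by_cases h : p c <;> simp [h] <;> omega

-- A's indicator-sum test equals B's `all` test (for same-length j).
lemma sum_indicator_eq_length_iff (p : Char → Bool) (l : List Char) :
    ((l.map (fun c => if p c then (1 : Nat) else 0)).sum == l.length) = l.all p := by
  rw [Bool.eq_iff_iff, beq_iff_eq, List.all_eq_true]
  induction l with
  | nil => simp
  | cons c cs ih =>
    have hle := indicator_sum_le p cs
    simp only [List.map_cons, List.sum_cons, List.length_cons, List.forall_mem_cons]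
    by_cases h : p c
    · simp only [h, if_pos, true_and]
      rw [← ih]
      omega
    · simp [h]
      omega

lemma hitA_eq_hitB (L : List String) (i : String) : pvHitA L i = pvHitB L i := by
  unfold pvHitA pvHitB pvSumCondA
  rw [List.any_filter]
  refine List.any_congr rfl (fun j => ?_)
  by_cases hlen : j.toList.length = i.toList.length
  · rw [← hlen, sum_indicator_eq_length_iff, Bool.and_assoc]
  · have h1 : (j.toList.length == i.toList.length) = false := by
      simp only [beq_eq_false_iff_ne, ne_eq]
      exact hlen
    rw [h1]
    simp

-- membership monotonicity of B's test
lemma hitB_mono {L L' : List String} (i : String)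
    (hsub : ∀ x ∈ L', x ∈ L) (h : pvHitB L i = false) : pvHitB L' i = false := by
  unfold pvHitB at *
  rw [List.any_eq_false] at *
  intro j hj
  exact h j (hsub j hj)

lemma erase_append_cons {i : String} {acc rs : List String}
    (hni : ∀ a ∈ acc, a ≠ i) : (acc ++ i :: rs).erase i = acc ++ rs := by
  induction acc with
  | nil => simp
  | cons a as ih =>
    have ha : a ≠ i := hni a (by simp)
    simp only [List.cons_append, List.erase_cons]
    have hba : (a == i) = false := by simp [ha]
    rw [hba]
    simp [ih (fun b hb => hni b (by simp [hb]))]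

-- main invariant lemma: if no already-kept element of acc hits in the current
-- list, A on the current list equals B's loop continued from (acc, rest).
lemma main_lemma (rest : List String) : ∀ acc : List String,
    (∀ a ∈ acc, pvHitB (acc ++ rest) a = false) →
    uniqueCombinations (acc ++ rest) = pvGoB acc rest := by
  induction rest with
  | nil =>
    intro acc h
    rw [uniqueCombinations]
    have hfind : (acc ++ []).find? (fun i => pvHitA (acc ++ []) i) = none := by
      rw [List.find?_eq_none]
      intro a ha
      rw [hitA_eq_hitB]
      simp only [List.append_nil] at *
      simp [h a ha]
    rw [hfind]
    show acc ++ [] = pvGoB acc []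
    simp [pvGoB]
  | cons i rs ih =>
    intro acc h
    by_cases hc : pvHitB (acc ++ i :: rs) i = true
    · -- i is dropped by both
      have hni : ∀ a ∈ acc, a ≠ i := by
        intro a ha hai
        have := h a ha
        rw [hai] at this
        rw [hc] at this
        exact absurd this (by simp)
      have hfind : (acc ++ i :: rs).find? (fun x => pvHitA (acc ++ i :: rs) x) = some i := by
        rw [List.find?_append]
        have h1 : acc.find? (fun x => pvHitA (acc ++ i :: rs) x) = none := by
          rw [List.find?_eq_none]
          intro a ha
          rw [hitA_eq_hitB]
          simp [h a ha]
        rw [h1]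
        have hAi : pvHitA (acc ++ i :: rs) i = true := by rw [hitA_eq_hitB]; exact hc
        simp [hAi]
      rw [uniqueCombinations, hfind]
      show uniqueCombinations ((acc ++ i :: rs).erase i) = pvGoB acc (i :: rs)
      rw [erase_append_cons hni]
      have hmono : ∀ a ∈ acc, pvHitB (acc ++ rs) a = false := by
        intro a ha
        refine hitB_mono a (fun x hx => ?_) (h a ha)
        simp only [List.mem_append, List.mem_cons] at *
        tauto
      rw [ih acc hmono]
      simp [pvGoB, hc]
    · -- i is kept by B, and is not (yet) the first hit for A either
      have hc' : pvHitB (acc ++ i :: rs) i = false := by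
        cases hx : pvHitB (acc ++ i :: rs) i
        · rfl
        · exact absurd hx hc
      have heq : (acc ++ [i]) ++ rs = acc ++ i :: rs := by simp
      have h' : ∀ a ∈ acc ++ [i], pvHitB ((acc ++ [i]) ++ rs) a = false := by
        intro a ha
        rw [heq]
        rcases List.mem_append.mp ha with h1 | h2
        · exact h a h1
        · have : a = i := by simpa using h2
          rw [this]; exact hc'
      have := ih (acc ++ [i]) h'
      rw [heq] at this
      rw [this]
      simp [pvGoB, hc']

-- ===== VERDICT (by name: the statement is the Claim_ definition above) =====
theorem uniqueCombinations_spec : Claim_equal_uniqueCombinations := by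
  intro L _
  unfold Spec_uniqueCombinations uniqueCombinations_alt
  have := main_lemma L [] (by simp)
  simpa using this
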